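-- pv_equiv track=rewrite | github.com/maxrp/zone_normalize | src/zone_normalize/__init__.py | set_flags
-- ===== SOURCE A (Python) =====
-- from typing import Dict, Iterator, Iterable, Tuple
--
-- def set_flags(line: str, multiline: bool) -> Tuple[bool, bool, bool]:
--     comments = False
--     end_of_multiline = False
--
--     for token in line:
--         if not multiline and token == '(':
--             multiline = True
--         if multiline and token == ')':
--             end_of_multiline = True
--         if token == ';':
--             comments = True
--     return (comments, multiline, end_of_multiline)
-- ===== SOURCE B (Python) =====
-- def set_flags(line, multiline):
--     comments = ';' in line
--     if multiline:
--         return (comments, True, ')' in line)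
--     i = line.find('(')
--     if i == -1:
--         return (comments, False, False)
--     return (comments, True, ')' in line[i+1:])
-- ===== Notes on version B (the rewrite author's own statement) =====
-- stated objective: idiomatic
-- what changed: Replaces the single stateful character loop with direct substring searches: ';' in line, and for the multiline pair a branch on the incoming flag using line.find('(') and a ')' search in the slice after it.
import Mathlib
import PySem

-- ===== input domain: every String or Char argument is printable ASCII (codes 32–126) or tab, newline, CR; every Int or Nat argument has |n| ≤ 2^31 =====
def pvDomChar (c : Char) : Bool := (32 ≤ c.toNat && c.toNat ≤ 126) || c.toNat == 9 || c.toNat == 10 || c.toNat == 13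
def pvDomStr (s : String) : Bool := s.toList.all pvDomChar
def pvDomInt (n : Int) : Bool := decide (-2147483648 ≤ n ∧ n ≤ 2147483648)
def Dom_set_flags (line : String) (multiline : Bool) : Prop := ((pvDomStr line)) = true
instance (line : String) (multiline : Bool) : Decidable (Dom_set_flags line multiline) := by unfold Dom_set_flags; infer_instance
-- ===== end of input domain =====

-- B replaces A's single stateful char loop by direct substring searches (';' membership, find '(' then search ')' after it); objective: idiomatic, same cost.


-- ===== PORT A =====
-- one loop iteration of A: the three ifs in A's order over state (comments, multiline, end_of_multiline)
def setFlagsStep (st : Bool × Bool × Bool) (token : Char) : Bool × Bool × Bool :=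
  let m := if !st.2.1 && token == '(' then true else st.2.1
  let e := if m && token == ')' then true else st.2.2
  let c := if token == ';' then true else st.1
  (c, m, e)

def set_flags (line : String) (multiline : Bool) : Bool × Bool × Bool :=
  line.toList.foldl setFlagsStep (false, multiline, false)

-- ===== PORT B =====
-- ';' in line / ')' in line → List.contains; line.find('(') == -1 ↔ no occurrence, else first index i →
-- List.idxOf? (some i = first index, none = not found); line[i+1:] with 0 ≤ i+1 → List.drop (i+1) (exact for Python slices with nonnegative start)
def set_flags_alt (line : String) (multiline : Bool) : Bool × Bool × Bool :=
  let l := line.toList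
  let comments := l.contains ';'
  if multiline then (comments, true, l.contains ')')
  else
    match l.idxOf? '(' with
    | none => (comments, false, false)
    | some i => (comments, true, (l.drop (i+1)).contains ')')

-- ===== PRECONDITION & SPEC =====
def Spec_set_flags (line : String) (multiline : Bool) (out : Bool × Bool × Bool) : Prop := out = set_flags_alt line multiline
instance (line : String) (multiline : Bool) (out : Bool × Bool × Bool) : Decidable (Spec_set_flags line multiline out) := by unfold Spec_set_flags; infer_instance

-- ===== CLAIM (what is proved, stated in full; the proofs are below) =====
def Claim_equal_set_flags : Prop := ∀ (line : String) (multiline : Bool), Dom_set_flags line multiline → Spec_set_flags line multiline (set_flags line multiline)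

-- ===== LEMMAS AND PROOFS =====

-- once multiline is true it stays true; comments/eom just accumulate membership
theorem foldl_step_true (l : List Char) : ∀ (c e : Bool),
    l.foldl setFlagsStep (c, true, e) = (c || l.contains ';', true, e || l.contains ')') := by
  induction l with
  | nil => intro c e; simp
  | cons x xs ih =>
    intro c e
    simp only [List.foldl_cons, setFlagsStep, List.contains_cons]
    by_cases hx : x = ')'
    · subst hx; simp [ih]
    · by_cases hs : x = ';'
      · subst hs; simp [ih]
      · simp [hx, hs]
        rw [ih]
        have h1 : (';' == x) = false := by simp [Ne.symm hs]
        have h2 : (')' == x) = false := by simp [Ne.symm hx]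
        simp [h1, h2]

theorem foldl_step_false (l : List Char) : ∀ (c : Bool),
    l.foldl setFlagsStep (c, false, false) =
      match l.idxOf? '(' with
      | none => (c || l.contains ';', false, false)
      | some i => (c || l.contains ';', true, (l.drop (i+1)).contains ')') := by
  induction l with
  | nil => intro c; simp
  | cons x xs ih =>
    intro c
    simp only [List.foldl_cons, setFlagsStep]
    by_cases hp : x = '('
    · subst hp
      simp [List.idxOf?_cons, foldl_step_true]
    · have hx' : (x == '(') = false := by simp [hp]
      by_cases hs : x = ';'
      · subst hs
        simp only [hx', Bool.and_false, Bool.not_false]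
        simp [List.idxOf?_cons, ih]
        cases h : xs.idxOf? '(' <;> simp
      · simp only [hx', Bool.and_false]
        have hs' : (x == ';') = false := by simp [hs]
        simp only [hs']
        by_cases hr : x = ')'
        · subst hr
          simp [List.idxOf?_cons, ih]
          cases h : xs.idxOf? '(' <;> simp
        · simp [List.idxOf?_cons, ih]
          cases h : xs.idxOf? '(' <;> simp [hp, Ne.symm hs]

-- ===== VERDICT (by name: the statement is the Claim_ definition above) =====
theorem set_flags_spec : Claim_equal_set_flags := by
  intro line multiline _
  show _ = _
  unfold set_flags set_flags_alt
  cases multiline with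
  | true => simp [foldl_step_true]
  | false =>
    simp only [foldl_step_false, Bool.false_or, if_neg Bool.false_ne_true]
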